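-- pv_equiv track=rewrite | github.com/jiadaizhao/LintCode | 1645-Least Subsequences/1645-Least Subsequences.py | LeastSubsequences
-- ===== SOURCE A (Python) =====
-- import bisect
--
-- def LeastSubsequences(arrayIn):
--     # Write your code here.
--     tail = []
--     for num in arrayIn:
--         index = bisect.bisect_right(tail, num)
--         if index == len(tail):
--             tail.append(num)
--         else:
--             tail[index] = num
--     return len(tail)
-- ===== SOURCE B (Python) =====
-- def LeastSubsequences(arrayIn):
--     # O(n^2) dynamic program: dp holds (value, length of the longest
--     # non-decreasing subsequence ending at that value); ans tracks the max.
--     dp = []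
--     ans = 0
--     for x in arrayIn:
--         best = 0
--         for (v, l) in dp:
--             if v <= x and l > best:
--                 best = l
--         dp.append((x, best + 1))
--         if ans < best + 1:
--             ans = best + 1
--     return ans
-- ===== Notes on version B (the rewrite author's own statement) =====
-- stated objective: alternative
-- what changed: Replaces the patience-sorting tails array with binary-search insertion by an O(n^2) dynamic program over (value, subsequence-length) pairs that tracks the running maximum.
import Mathlib
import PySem

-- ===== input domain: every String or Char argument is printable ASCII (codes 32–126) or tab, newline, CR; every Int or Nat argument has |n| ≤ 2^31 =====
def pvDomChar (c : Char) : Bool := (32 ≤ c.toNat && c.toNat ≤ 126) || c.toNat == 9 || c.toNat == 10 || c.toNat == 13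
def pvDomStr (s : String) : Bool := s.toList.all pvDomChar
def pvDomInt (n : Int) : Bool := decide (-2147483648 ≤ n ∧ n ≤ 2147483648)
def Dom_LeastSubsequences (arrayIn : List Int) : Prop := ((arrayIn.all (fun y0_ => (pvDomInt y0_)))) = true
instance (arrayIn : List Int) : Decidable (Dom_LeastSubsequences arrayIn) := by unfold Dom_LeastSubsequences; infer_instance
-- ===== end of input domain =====

-- B replaces A's patience-sorting tails array by an O(n^2) dynamic program over
-- (value, subsequence-length) pairs; same return value, alternative algorithm.

-- ===== PORT A =====
-- bisect.bisect_right l x: exact on sorted `l` (the insertion point after equal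
-- elements = the number of elements ≤ x); `tail` below is always kept sorted.
def pvBisectRight (l : List Int) (x : Int) : Nat :=
  l.countP (fun t => decide (t ≤ x))

def pvStepA (tail : List Int) (num : Int) : List Int :=
  let index := pvBisectRight tail num
  if index = tail.length then tail ++ [num] else tail.set index num

def LeastSubsequences (arrayIn : List Int) : Int :=
  ((arrayIn.foldl pvStepA []).length : Int)

-- ===== PORT B =====
-- inner loop of Source B: best length among recorded pairs whose value is ≤ x
def pvBest (dp : List (Int × Int)) (x : Int) : Int :=
  dp.foldl (fun best p => if p.1 ≤ x ∧ best < p.2 then p.2 else best) 0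

-- one iteration of Source B's outer loop over the state (dp, ans)
def pvStepB (st : List (Int × Int) × Int) (x : Int) : List (Int × Int) × Int :=
  let best := pvBest st.1 x
  (st.1 ++ [(x, best + 1)], if st.2 < best + 1 then best + 1 else st.2)

def LeastSubsequences_alt (arrayIn : List Int) : Int :=
  (arrayIn.foldl pvStepB ([], 0)).2

-- ===== PRECONDITION & SPEC =====
def Spec_LeastSubsequences (arrayIn : List Int) (out : Int) : Prop := out = LeastSubsequences_alt arrayIn
instance (arrayIn : List Int) (out : Int) : Decidable (Spec_LeastSubsequences arrayIn out) := by unfold Spec_LeastSubsequences; infer_instance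

-- ===== CLAIM (what is proved, stated in full; the proofs are below) =====
def Claim_equal_LeastSubsequences : Prop := ∀ (arrayIn : List Int), Dom_LeastSubsequences arrayIn → Spec_LeastSubsequences arrayIn (LeastSubsequences arrayIn)

-- ===== LEMMAS AND PROOFS =====

-- Coupling invariant between A's tails array and B's (dp, ans) state:
-- tail is sorted, ans is tail's length, and for every threshold v the number of
-- tail entries ≤ v equals the best dp-length among recorded values ≤ v.
def pvInv (tail : List Int) (st : List (Int × Int) × Int) : Prop :=
  tail.Pairwise (· ≤ ·) ∧ st.2 = (tail.length : Int) ∧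
    ∀ v : Int, ((tail.countP (fun t => decide (t ≤ v)) : Nat) : Int) = pvBest st.1 v

-- On a sorted list, position k holds an element ≤ x iff k is below the count of
-- elements ≤ x (the elements ≤ x form exactly the prefix of that length).
theorem pv_cnt_char (x : Int) : ∀ (l : List Int), l.Pairwise (· ≤ ·) →
    ∀ (k : Nat) (h : k < l.length),
      (l[k] ≤ x ↔ k < l.countP (fun t => decide (t ≤ x))) := by
  intro l
  induction l with
  | nil => intro _ k h; simp at h
  | cons a t ih =>
    intro hp k h
    have hat : ∀ b ∈ t, a ≤ b := (List.pairwise_cons.mp hp).1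
    have ht : t.Pairwise (· ≤ ·) := (List.pairwise_cons.mp hp).2
    by_cases hax : a ≤ x
    · cases k with
      | zero =>
        simp [hax]
      | succ k =>
        have hk : k < t.length := by simpa using h
        have := ih ht k hk
        simp only [List.getElem_cons_succ, List.countP_cons, hax]
        simpa using this
    · have ht0 : t.countP (fun t => decide (t ≤ x)) = 0 := by
        rw [List.countP_eq_zero]
        intro b hb
        have : a ≤ b := hat b hb
        simp only [decide_eq_true_eq]
        omega
      cases k with
      | zero => simp [hax, ht0]
      | succ k =>
        have hk : k < t.length := by simpa using h
        have hmem : t[k] ∈ t := List.getElem_mem hk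
        have : a ≤ t[k] := hat _ hmem
        simp only [List.getElem_cons_succ, List.countP_cons, hax, ht0]
        constructor
        · intro hle; omega
        · intro hlt; simp at hlt

-- appending one pair to Source B's dp list extends the inner-loop fold by one step
theorem pvBest_append (ps : List (Int × Int)) (q : Int × Int) (v : Int) :
    pvBest (ps ++ [q]) v =
      if q.1 ≤ v ∧ pvBest ps v < q.2 then q.2 else pvBest ps v := by
  unfold pvBest
  rw [List.foldl_append]
  simp [List.foldl_cons, List.foldl_nil]

-- A's step, written as a splice at the insertion point.
theorem pvStepA_splice (tail : List Int) (x : Int) :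
    pvStepA tail x =
      tail.take (tail.countP (fun t => decide (t ≤ x))) ++
        x :: tail.drop (tail.countP (fun t => decide (t ≤ x)) + 1) := by
  unfold pvStepA pvBisectRight
  set c := tail.countP (fun t => decide (t ≤ x)) with hc
  by_cases hcl : c = tail.length
  · have hd : tail.drop (c + 1) = [] := by
      apply List.drop_eq_nil_of_le; omega
    simp [hcl, hd]
  · have hle : c ≤ tail.length := List.countP_le_length ..
    have hlt : c < tail.length := lt_of_le_of_ne hle hcl
    simp [hcl, List.set_eq_take_cons_drop x hlt]

-- The coupling invariant is preserved by one parallel step.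
theorem pvStep_inv (tail : List Int) (st : List (Int × Int) × Int) (x : Int)
    (h : pvInv tail st) : pvInv (pvStepA tail x) (pvStepB st x) := by
  obtain ⟨hs, hans, hcnt⟩ := h
  set idx := tail.countP (fun t => decide (t ≤ x)) with hidx
  have hle : idx ≤ tail.length := List.countP_le_length ..
  have hbest : pvBest st.1 x = (idx : Int) := (hcnt x).symm
  -- elements of the kept prefix are ≤ x
  have hpre : ∀ a ∈ tail.take idx, a ≤ x := by
    intro a ha
    obtain ⟨k, hk, rfl⟩ := List.getElem_of_mem ha
    have hk' : k < idx := by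
      have := hk; simp [List.length_take] at this; omega
    have hkl : k < tail.length := lt_of_lt_of_le hk' hle
    have : tail[k] ≤ x := (pv_cnt_char x tail hs k hkl).mpr hk'
    simpa [List.getElem_take] using this
  -- elements of the dropped suffix are > x
  have hsuf : ∀ b ∈ tail.drop (idx + 1), ¬ b ≤ x := by
    intro b hb
    obtain ⟨k, hk, rfl⟩ := List.getElem_of_mem hb
    have hkl : idx + 1 + k < tail.length := by
      have := hk; simp [List.length_drop] at this; omega
    have : ¬ (idx + 1 + k < idx) := by omega
    have hnot := (pv_cnt_char x tail hs (idx + 1 + k) hkl).not.mpr (by omega)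
    simpa [List.getElem_drop] using hnot
  refine ⟨?_, ?_, ?_⟩
  · -- sortedness of the new tail
    rw [pvStepA_splice, ← hidx, List.pairwise_append]
    refine ⟨hs.sublist (List.take_sublist _ _), ?_, ?_⟩
    · rw [List.pairwise_cons]
      exact ⟨fun b hb => le_of_not_ge fun hbx => hsuf b hb hbx,
        hs.sublist (List.drop_sublist _ _)⟩
    · intro a ha b hb
      rcases List.mem_cons.mp hb with rfl | hb'
      · exact hpre a ha
      · exact le_trans (hpre a ha) (le_of_not_ge fun hbx => hsuf b hb' hbx)
  · -- new ans = new length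
    show (if st.2 < pvBest st.1 x + 1 then pvBest st.1 x + 1 else st.2) = _
    rw [pvStepA_splice, ← hidx]
    have hlen : (tail.take idx ++ x :: tail.drop (idx + 1)).length =
        idx + 1 + (tail.length - (idx + 1)) := by
      simp [List.length_take, List.length_drop]; omega
    rw [hbest, hans, hlen]
    by_cases hcl : idx = tail.length
    · have : (tail.length : Int) < (idx : Int) + 1 := by omega
      rw [if_pos this]; omega
    · have hlt : idx < tail.length := lt_of_le_of_ne hle hcl
      have : ¬ ((tail.length : Int) < (idx : Int) + 1) := by omega
      rw [if_neg this]; omega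
  · -- count/best coupling for every threshold v
    intro v
    show _ = pvBest (st.1 ++ [(x, pvBest st.1 x + 1)]) v
    rw [pvStepA_splice, ← hidx, pvBest_append, hbest, ← hcnt v]
    set cv := tail.countP (fun t => decide (t ≤ v)) with hcv
    rw [List.countP_append, List.countP_cons]
    by_cases hxv : x ≤ v
    · -- everything ≤ x is ≤ v
      have htake : (tail.take idx).countP (fun t => decide (t ≤ v)) = idx := by
        rw [List.countP_eq_length.mpr, List.length_take]
        · omega
        · intro a ha; simpa using le_trans (hpre a ha) hxv
      by_cases hcl : idx = tail.length
      · -- append case: all of tail is ≤ x ≤ v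
        have hall : ∀ a ∈ tail, a ≤ v := by
          intro a ha
          obtain ⟨k, hk, rfl⟩ := List.getElem_of_mem ha
          have : tail[k] ≤ x := (pv_cnt_char x tail hs k hk).mpr (by omega)
          exact le_trans this hxv
        have hcv' : cv = tail.length := by
          rw [hcv, List.countP_eq_length.mpr]
          intro a ha; simpa using hall a ha
        have hd : tail.drop (idx + 1) = [] := by
          apply List.drop_eq_nil_of_le; omega
        rw [htake, hd]
        simp only [List.countP_nil, decide_eq_true_eq]
        split_ifs <;> omega
      · have hlt : idx < tail.length := lt_of_le_of_ne hle hcl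
        -- splice tail itself at position idx
        have hsplit : cv = idx + ((if tail[idx] ≤ v then 1 else 0)
            + (tail.drop (idx + 1)).countP (fun t => decide (t ≤ v))) := by
          have h1 : tail = tail.take idx ++ tail[idx] :: tail.drop (idx + 1) := by
            conv_lhs => rw [← List.take_append_drop idx tail]
            rw [List.getElem_cons_drop]
          rw [hcv]
          conv_lhs => rw [h1]
          rw [List.countP_append, List.countP_cons, htake]
          simp only [decide_eq_true_eq]
          omega
        by_cases hiv : tail[idx] ≤ v
        · -- the replaced slot was ≤ v already: counts agree, no new max
          have hge : cv = idx + 1 + (tail.drop (idx + 1)).countP (fun t => decide (t ≤ v)) := by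
            rw [hsplit]; simp only [hiv, if_pos]; omega
          rw [htake]
          simp only [decide_eq_true_eq]
          split_ifs <;> omega
        · -- the replaced slot and everything after were > v
          have hcd : (tail.drop (idx + 1)).countP (fun t => decide (t ≤ v)) = 0 := by
            rw [List.countP_eq_zero]
            intro b hb
            obtain ⟨k, hk, rfl⟩ := List.getElem_of_mem hb
            have hkl : idx + 1 + k < tail.length := by
              have := hk; simp [List.length_drop] at this; omega
            have hmono : tail[idx] ≤ tail[idx + 1 + k] := by
              have := (List.pairwise_iff_getElem.mp hs) idx (idx + 1 + k) hlt hkl (by omega)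
              exact this
            have : ¬ (tail.drop (idx + 1))[k] ≤ v := by
              rw [List.getElem_drop]
              intro hle'; exact hiv (le_trans hmono hle')
            simpa using this
          have hcveq : cv = idx := by rw [hsplit, hcd]; simp [hiv]
          rw [htake, hcd]
          simp only [decide_eq_true_eq]
          split_ifs <;> omega
    · -- v < x: the new element and everything after are > v; counts unchanged
      have hvx : v < x := by omega
      by_cases hcl : idx = tail.length
      · have hd : tail.drop (idx + 1) = [] := by
          apply List.drop_eq_nil_of_le; omega
        rw [hd, List.take_of_length_le (le_of_eq hcl.symm), ← hcv]
        simp only [List.countP_nil, decide_eq_true_eq]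
        split_ifs <;> omega
      · have hlt : idx < tail.length := lt_of_le_of_ne hle hcl
        have hiv : ¬ tail[idx] ≤ v := by
          intro hle'
          have : tail[idx] ≤ x := le_trans hle' (le_of_lt hvx)
          have := (pv_cnt_char x tail hs idx hlt).mp this
          omega
        have h1 : tail = tail.take idx ++ tail[idx] :: tail.drop (idx + 1) := by
          conv_lhs => rw [← List.take_append_drop idx tail]
          rw [List.getElem_cons_drop]
        have hsplit : cv = (tail.take idx).countP (fun t => decide (t ≤ v))
            + (tail.drop (idx + 1)).countP (fun t => decide (t ≤ v)) := by
          rw [hcv]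
          conv_lhs => rw [h1]
          rw [List.countP_append, List.countP_cons]
          simp [hiv]
        rw [hsplit]
        simp only [decide_eq_true_eq]
        split_ifs <;> omega

theorem pv_fold_inv (arr : List Int) :
    ∀ (tail : List Int) (st : List (Int × Int) × Int), pvInv tail st →
      pvInv (arr.foldl pvStepA tail) (arr.foldl pvStepB st) := by
  induction arr with
  | nil => intro tail st h; simpa using h
  | cons x rest ih =>
    intro tail st h
    simp only [List.foldl_cons]
    exact ih _ _ (pvStep_inv tail st x h)

-- ===== VERDICT (by name: the statement is the Claim_ definition above) =====
theorem LeastSubsequences_spec : Claim_equal_LeastSubsequences := by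
  intro arrayIn _
  unfold Spec_LeastSubsequences LeastSubsequences LeastSubsequences_alt
  have hinv : pvInv [] (([] : List (Int × Int)), (0 : Int)) := by
    refine ⟨List.Pairwise.nil, by simp, fun v => by simp [pvBest]⟩
  have h := pv_fold_inv arrayIn [] ([], 0) hinv
  exact h.2.1.symm
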